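-- pv_equiv track=rewrite | github.com/dougfoo/iouoptima | djserver/iouapp/puzzles.py | tailrec
-- ===== SOURCE A (Python) =====
-- import itertools
--
-- def tailrec(i, n):
--     def trav(left, right):
--         try:
--             next(left)
--             next(right)
--             return trav(left,right)
--         except StopIteration:
--             return right
--     l,r = itertools.tee(i)
--     for x in range(n):
--         next(l)
--     return list(trav(l,r))
-- ===== SOURCE B (Python) =====
-- def tailrec(i, n):
--     # Different algorithm: materialize once and slice, instead of tee + advance-by-n + paired traversal.
--     xs = list(i)
--     return xs[-n:] if n > 0 else []
-- ===== Notes on version B (the rewrite author's own statement) =====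
-- stated objective: simpler
-- what changed: Replaces the tee/gap recursion (advance one copy by n, then recursively step both iterators until the leader exhausts) with a single list materialization and one negative-index slice xs[-n:] (empty list for n<=0).
import Mathlib
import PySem

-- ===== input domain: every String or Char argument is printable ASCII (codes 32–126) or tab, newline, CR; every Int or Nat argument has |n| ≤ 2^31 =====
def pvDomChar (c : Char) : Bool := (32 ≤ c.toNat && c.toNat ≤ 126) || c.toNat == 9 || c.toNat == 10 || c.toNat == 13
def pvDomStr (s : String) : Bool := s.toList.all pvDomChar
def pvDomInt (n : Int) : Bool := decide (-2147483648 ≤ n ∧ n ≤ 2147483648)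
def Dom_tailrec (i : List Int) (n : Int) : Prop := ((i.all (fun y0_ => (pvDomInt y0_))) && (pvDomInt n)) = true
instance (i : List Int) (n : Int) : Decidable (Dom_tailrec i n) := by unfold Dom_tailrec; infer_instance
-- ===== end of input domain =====

-- B replaces A's tee/gap recursion by one materialization and a single negative-index slice (objective: simpler).


-- ===== PORT A =====
-- `for x in range(n): next(l)` — advance the leading tee copy n times; none = StopIteration escapes.
def pvAdvA (l : List Int) (k : Nat) : Option (List Int) :=
  match l, k with
  | l, 0 => some l
  | [], _ + 1 => none
  | _ :: ls, k + 1 => pvAdvA ls k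

-- trav(left, right): next(left); next(right); recurse — on StopIteration from next(left), return right.
def pvTravA (left right : List Int) : List Int :=
  match left, right with
  | [], r => r
  | _ :: _, [] => []          -- next(right) exhausted: unreachable, right is never shorter than left
  | _ :: ls, _ :: rs => pvTravA ls rs

def tailrec (i : List Int) (n : Int) : List Int :=
  match pvAdvA i n.toNat with
  | none => []                 -- StopIteration escaped; excluded by Pre_tailrec
  | some l => pvTravA l i

-- ===== PORT B =====
def tailrec_alt (i : List Int) (n : Int) : List Int :=
  if 0 < n then PySem.List.slice i (some (-n)) none else []

-- ===== PRECONDITION & SPEC =====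
-- Pre_ excludes exactly n > len(i), where A raises StopIteration while advancing the leading tee copy
-- (B, unverified here, returns the whole list there).
def Pre_tailrec (i : List Int) (n : Int) : Prop := n ≤ (i.length : Int)
instance (i : List Int) (n : Int) : Decidable (Pre_tailrec i n) := by unfold Pre_tailrec; infer_instance
def pvWitness_tailrec : List Int × Int := ([1, 2, 3], 2)

def Spec_tailrec (i : List Int) (n : Int) (out : List Int) : Prop := out = tailrec_alt i n
instance (i : List Int) (n : Int) (out : List Int) : Decidable (Spec_tailrec i n out) := by unfold Spec_tailrec; infer_instance

-- ===== CLAIM (what is proved, stated in full; the proofs are below) =====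
def Claim_equal_tailrec : Prop := ∀ (i : List Int) (n : Int), Dom_tailrec i n → Pre_tailrec i n → Spec_tailrec i n (tailrec i n)

-- ===== LEMMAS AND PROOFS =====
theorem pvAdvA_eq_drop (l : List Int) (k : Nat) (hk : k ≤ l.length) :
    pvAdvA l k = some (l.drop k) := by
  induction l generalizing k with
  | nil => cases k <;> simp_all [pvAdvA]
  | cons a ls ih =>
    cases k with
    | zero => simp [pvAdvA]
    | succ k => simp only [pvAdvA, List.drop_succ_cons]; exact ih k (by simpa using hk)

theorem pvTravA_eq (left right : List Int) (h : left.length ≤ right.length) :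
    pvTravA left right = right.drop left.length := by
  induction left generalizing right with
  | nil => simp [pvTravA]
  | cons a ls ih =>
    cases right with
    | nil => simp at h
    | cons b rs => simpa [pvTravA] using ih rs (by simpa using h)

-- ===== VERDICT (by name: the statement is the Claim_ definition above) =====
theorem tailrec_spec : Claim_equal_tailrec := by
  intro i n _ hpre
  unfold Spec_tailrec tailrec tailrec_alt
  have hlen : n.toNat ≤ i.length := by
    unfold Pre_tailrec at hpre; omega
  rw [pvAdvA_eq_drop i n.toNat hlen]
  show pvTravA (i.drop n.toNat) i = _
  rw [pvTravA_eq (i.drop n.toNat) i (by simpa using Nat.sub_le _ _)]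
  by_cases hn : 0 < n
  · have hk : 0 < n.toNat := by omega
    have : (-n : Int) = -(n.toNat : Int) := by omega
    rw [if_pos hn, this, PySem.List.slice_from_neg_natCast i n.toNat hk,
        List.length_drop]
  · have : n.toNat = 0 := by omega
    rw [if_neg hn, this]
    simp
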